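-- pv_equiv track=rewrite | github.com/kh277/BOJ | 백준/Gold/32136. 소신발언/소신발언.py | solve
-- ===== SOURCE A (Python) =====
-- INF = 10**15
--
-- def check(N, A, x):
--     result = 0
--     for i in range(0, x):
--         result = max(result, (x-i)*A[i])
--     for i in range(x+1, N):
--         result = max(result, (i-x)*A[i])
--
--     return result
--
-- def solve(N, A):
--     start = 0
--     end = N-1
--
--     # 삼분 탐색으로 가동 시간을 최소로 만드는 지점 찾기
--     while end - start > 2:
--         mid1 = (start*2+end)//3
--         mid2 = (start+end*2)//3
--
--         if check(N, A, mid1) > check(N, A, mid2):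
--             start = mid1+1
--         else:
--             end = mid2
--
--     # 그 지점에서 최소 Ti값 찾기
--     result = INF
--     for i in range(start, end+1):
--         result = min(result, check(N, A, i))
--
--     return result
-- ===== SOURCE B (Python) =====
-- INF = 10**15
--
-- def solve(N, A):
--     # Direct scan: the cost at pivot x is max(0, max_i |x-i|*A[i]); minimize over all pivots.
--     best = INF
--     for x in range(N):
--         cur = 0
--         for i, v in enumerate(A[:N]):
--             t = abs(x - i) * v
--             if t > cur:
--                 cur = t
--         best = min(best, cur)
--     return best
-- ===== Notes on version B (the rewrite author's own statement) =====
-- stated objective: simpler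
-- what changed: B replaces A's ternary search (which relies on convexity of the pivot cost) plus final window scan with a direct single scan over all pivots, computing each pivot's cost as max(0, max_i |x-i|*A[i]) in one inner loop; no search logic at all.
import Mathlib
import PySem

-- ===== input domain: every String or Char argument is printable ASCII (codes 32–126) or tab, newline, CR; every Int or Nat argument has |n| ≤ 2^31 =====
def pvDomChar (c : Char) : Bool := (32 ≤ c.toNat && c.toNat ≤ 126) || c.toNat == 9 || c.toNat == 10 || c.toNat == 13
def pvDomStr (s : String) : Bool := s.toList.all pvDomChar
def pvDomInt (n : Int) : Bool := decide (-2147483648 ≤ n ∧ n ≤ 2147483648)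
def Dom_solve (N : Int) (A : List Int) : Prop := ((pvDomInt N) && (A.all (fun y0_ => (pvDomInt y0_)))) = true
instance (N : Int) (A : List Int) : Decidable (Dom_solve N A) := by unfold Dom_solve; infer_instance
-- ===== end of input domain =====

-- B replaces A's ternary search over the convex pivot cost by a direct scan of all pivots
-- (objective: simpler; not faster — B is O(N^2) vs A's O(N log N)).

-- ===== PORT A =====
-- check(N, A, x): two directional max loops
def checkA (N : Int) (A : List Int) (x : Int) : Int :=
  (PySem.List.pyRange (x + 1) N 1).foldl
    (fun result i => max result ((i - x) * PySem.List.pyGetD A i 0))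
    ((PySem.List.pyRange 0 x 1).foldl
      (fun result i => max result ((x - i) * PySem.List.pyGetD A i 0)) 0)

-- midpoint bounds used for the while loop's termination
theorem pvMidBounds (s e : Int) (h : 2 < e - s) :
    s ≤ PySem.Int.floordiv (s * 2 + e) 3 ∧
    PySem.Int.floordiv (s * 2 + e) 3 < PySem.Int.floordiv (s + e * 2) 3 ∧
    PySem.Int.floordiv (s + e * 2) 3 ≤ e - 1 := by
  rw [PySem.Int.floordiv_eq_ediv_of_pos (by norm_num), PySem.Int.floordiv_eq_ediv_of_pos (by norm_num)]
  omega

-- the `while end - start > 2` ternary-search loop of A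
def solveWhile (N : Int) (A : List Int) (s e : Int) : Int × Int :=
  if h : 2 < e - s then
    let mid1 := PySem.Int.floordiv (s * 2 + e) 3
    let mid2 := PySem.Int.floordiv (s + e * 2) 3
    if checkA N A mid1 > checkA N A mid2 then solveWhile N A (mid1 + 1) e
    else solveWhile N A s mid2
  else (s, e)
termination_by (e - s).toNat
decreasing_by
  · have := pvMidBounds s e h; omega
  · have := pvMidBounds s e h; omega

def solve (N : Int) (A : List Int) : Int :=
  let p := solveWhile N A 0 (N - 1)
  (PySem.List.pyRange p.1 (p.2 + 1) 1).foldl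
    (fun result i => min result (checkA N A i)) 1000000000000000

-- ===== PORT B =====
-- cost of pivot x: one inner loop over enumerate(A[:N])
def innerB (N : Int) (A : List Int) (x : Int) : Int :=
  (PySem.List.enumerate (PySem.List.slice A none (some N)) 0).foldl
    (fun cur p => if |x - p.1| * p.2 > cur then |x - p.1| * p.2 else cur) 0

def solve_alt (N : Int) (A : List Int) : Int :=
  (PySem.List.pyRange 0 N 1).foldl
    (fun best x => min best (innerB N A x)) 1000000000000000

-- ===== PRECONDITION & SPEC =====
-- Pre_ excludes exactly the inputs where A raises IndexError: 2 ≤ N with fewer than N list entries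
-- (for N ≤ 1 no element is ever indexed, so A returns for any list).
def Pre_solve (N : Int) (A : List Int) : Prop := N ≤ 1 ∨ N ≤ (A.length : Int)
instance (N : Int) (A : List Int) : Decidable (Pre_solve N A) := by unfold Pre_solve; infer_instance
def pvWitness_solve : Int × List Int := (3, [2, 1, 4])

def Spec_solve (N : Int) (A : List Int) (out : Int) : Prop := out = solve_alt N A
instance (N : Int) (A : List Int) (out : Int) : Decidable (Spec_solve N A out) := by unfold Spec_solve; infer_instance

-- ===== CLAIM (what is proved, stated in full; the proofs are below) =====
def Claim_equal_solve : Prop := ∀ (N : Int) (A : List Int), Dom_solve N A → Pre_solve N A → Spec_solve N A (solve N A)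

-- ===== LEMMAS AND PROOFS =====

-- generic fold-max / fold-min over an integer range [a, b)
def loMax (f : Int → Int) (a b acc : Int) : Int :=
  (PySem.List.pyRange a b 1).foldl (fun r i => max r (f i)) acc

def loMin (f : Int → Int) (a b acc : Int) : Int :=
  (PySem.List.pyRange a b 1).foldl (fun r i => min r (f i)) acc

-- the common mathematical value both ports compute with: max(0, max_{0≤i<N} |x-i|*A[i])
def Fv (N : Int) (A : List Int) (x : Int) : Int :=
  loMax (fun i => |x - i| * PySem.List.pyGetD A i 0) 0 N 0

theorem loMax_nil (f : Int → Int) (a b acc : Int) (h : b ≤ a) : loMax f a b acc = acc := by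
  simp [loMax, PySem.List.pyRange_one_eq_nil h]

theorem loMax_cons (f : Int → Int) (a b acc : Int) (h : a < b) :
    loMax f a b acc = loMax f (a + 1) b (max acc (f a)) := by
  rw [loMax, PySem.List.pyRange_one_cons h]; rfl

theorem loMin_nil (f : Int → Int) (a b acc : Int) (h : b ≤ a) : loMin f a b acc = acc := by
  simp [loMin, PySem.List.pyRange_one_eq_nil h]

theorem loMin_cons (f : Int → Int) (a b acc : Int) (h : a < b) :
    loMin f a b acc = loMin f (a + 1) b (min acc (f a)) := by
  rw [loMin, PySem.List.pyRange_one_cons h]; rfl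

theorem acc_le_loMax (f : Int → Int) (a b acc : Int) : acc ≤ loMax f a b acc := by
  by_cases h : a < b
  · rw [loMax_cons f a b acc h]
    exact le_trans (le_max_left _ _) (acc_le_loMax f (a + 1) b _)
  · rw [loMax_nil f a b acc (by omega)]
termination_by (b - a).toNat
decreasing_by omega

theorem le_loMax (f : Int → Int) (a b acc x : Int) (h1 : a ≤ x) (h2 : x < b) :
    f x ≤ loMax f a b acc := by
  have hab : a < b := by omega
  rw [loMax_cons f a b acc hab]
  by_cases hx : x = a
  · subst hx
    exact le_trans (le_max_right _ _) (acc_le_loMax f (x + 1) b _)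
  · exact le_loMax f (a + 1) b _ x (by omega) h2
termination_by (b - a).toNat
decreasing_by omega

theorem loMax_le (f : Int → Int) (a b acc t : Int) (hacc : acc ≤ t)
    (hf : ∀ x, a ≤ x → x < b → f x ≤ t) : loMax f a b acc ≤ t := by
  by_cases h : a < b
  · rw [loMax_cons f a b acc h]
    exact loMax_le f (a + 1) b _ t (max_le hacc (hf a le_rfl h)) (fun x h1 h2 => hf x (by omega) h2)
  · rw [loMax_nil f a b acc (by omega)]; exact hacc
termination_by (b - a).toNat
decreasing_by omega

theorem loMax_exists (f : Int → Int) (a b acc : Int) :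
    loMax f a b acc = acc ∨ ∃ x, a ≤ x ∧ x < b ∧ loMax f a b acc = f x := by
  by_cases h : a < b
  · rw [loMax_cons f a b acc h]
    rcases loMax_exists f (a + 1) b (max acc (f a)) with h0 | ⟨x, hx1, hx2, hx⟩
    · rcases max_choice acc (f a) with hm | hm
      · exact Or.inl (h0.trans hm)
      · exact Or.inr ⟨a, le_rfl, h, h0.trans hm⟩
    · exact Or.inr ⟨x, by omega, hx2, hx⟩
  · rw [loMax_nil f a b acc (by omega)]; exact Or.inl rfl
termination_by (b - a).toNat
decreasing_by omega

theorem loMax_congr (f g : Int → Int) (a b acc : Int)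
    (hf : ∀ x, a ≤ x → x < b → f x = g x) : loMax f a b acc = loMax g a b acc := by
  by_cases h : a < b
  · rw [loMax_cons f a b acc h, loMax_cons g a b acc h, hf a le_rfl h]
    exact loMax_congr f g (a + 1) b _ (fun x h1 h2 => hf x (by omega) h2)
  · rw [loMax_nil f a b acc (by omega), loMax_nil g a b acc (by omega)]
termination_by (b - a).toNat
decreasing_by omega

theorem loMax_split (f : Int → Int) (a m b acc : Int) (h1 : a ≤ m) (h2 : m ≤ b) :
    loMax f a b acc = loMax f m b (loMax f a m acc) := by
  simp [loMax, PySem.List.pyRange_one_append a m b h1 h2, List.foldl_append]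

theorem loMin_le_acc (f : Int → Int) (a b acc : Int) : loMin f a b acc ≤ acc := by
  by_cases h : a < b
  · rw [loMin_cons f a b acc h]
    exact le_trans (loMin_le_acc f (a + 1) b _) (min_le_left _ _)
  · rw [loMin_nil f a b acc (by omega)]
termination_by (b - a).toNat
decreasing_by omega

theorem loMin_le (f : Int → Int) (a b acc x : Int) (h1 : a ≤ x) (h2 : x < b) :
    loMin f a b acc ≤ f x := by
  have hab : a < b := by omega
  rw [loMin_cons f a b acc hab]
  by_cases hx : x = a
  · subst hx
    exact le_trans (loMin_le_acc f (x + 1) b _) (min_le_right _ _)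
  · exact loMin_le f (a + 1) b _ x (by omega) h2
termination_by (b - a).toNat
decreasing_by omega

theorem le_loMin (f : Int → Int) (a b acc t : Int) (hacc : t ≤ acc)
    (hf : ∀ x, a ≤ x → x < b → t ≤ f x) : t ≤ loMin f a b acc := by
  by_cases h : a < b
  · rw [loMin_cons f a b acc h]
    exact le_loMin f (a + 1) b _ t (le_min hacc (hf a le_rfl h)) (fun x h1 h2 => hf x (by omega) h2)
  · rw [loMin_nil f a b acc (by omega)]; exact hacc
termination_by (b - a).toNat
decreasing_by omega

theorem loMin_congr (f g : Int → Int) (a b acc : Int)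
    (hf : ∀ x, a ≤ x → x < b → f x = g x) : loMin f a b acc = loMin g a b acc := by
  by_cases h : a < b
  · rw [loMin_cons f a b acc h, loMin_cons g a b acc h, hf a le_rfl h]
    exact loMin_congr f g (a + 1) b _ (fun x h1 h2 => hf x (by omega) h2)
  · rw [loMin_nil f a b acc (by omega), loMin_nil g a b acc (by omega)]
termination_by (b - a).toNat
decreasing_by omega

-- Fv facts
theorem Fv_nonneg (N : Int) (A : List Int) (x : Int) : 0 ≤ Fv N A x :=
  acc_le_loMax _ _ _ _

theorem Fv_convex (N : Int) (A : List Int) (a b c : Int) (hab : a ≤ b) (hbc : b ≤ c) :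
    (c - a) * Fv N A b ≤ (c - b) * Fv N A a + (b - a) * Fv N A c := by
  have hFa := Fv_nonneg N A a
  have hFb := Fv_nonneg N A b
  have hFc := Fv_nonneg N A c
  have hzero : Fv N A b = 0 →
      (c - a) * Fv N A b ≤ (c - b) * Fv N A a + (b - a) * Fv N A c := by
    intro hb
    rw [hb, mul_zero]
    exact add_nonneg (mul_nonneg (by omega) hFa) (mul_nonneg (by omega) hFc)
  rcases loMax_exists (fun i => |b - i| * PySem.List.pyGetD A i 0) 0 N 0 with h0 | ⟨i, _, hi2, hF⟩
  · exact hzero h0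
  · have hF' : Fv N A b = |b - i| * PySem.List.pyGetD A i 0 := hF
    by_cases hv : 0 ≤ PySem.List.pyGetD A i 0
    · have hga : |a - i| * PySem.List.pyGetD A i 0 ≤ Fv N A a :=
        le_loMax (fun j => |a - j| * PySem.List.pyGetD A j 0) 0 N 0 i (by omega) hi2
      have hgc : |c - i| * PySem.List.pyGetD A i 0 ≤ Fv N A c :=
        le_loMax (fun j => |c - j| * PySem.List.pyGetD A j 0) 0 N 0 i (by omega) hi2
      have tri : (c - a) * |b - i| ≤ (c - b) * |a - i| + (b - a) * |c - i| := by
        have key : (c - b) * (a - i) + (b - a) * (c - i) = (c - a) * (b - i) := by ring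
        calc (c - a) * |b - i| = |(c - a) * (b - i)| := by
              rw [abs_mul, abs_of_nonneg (by omega : (0:Int) ≤ c - a)]
          _ = |(c - b) * (a - i) + (b - a) * (c - i)| := by rw [key]
          _ ≤ |(c - b) * (a - i)| + |(b - a) * (c - i)| := abs_add_le _ _
          _ = (c - b) * |a - i| + (b - a) * |c - i| := by
              rw [abs_mul, abs_mul, abs_of_nonneg (by omega : (0:Int) ≤ c - b),
                abs_of_nonneg (by omega : (0:Int) ≤ b - a)]
      have h1 : (c - b) * (|a - i| * PySem.List.pyGetD A i 0) ≤ (c - b) * Fv N A a :=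
        mul_le_mul_of_nonneg_left hga (by omega)
      have h2 : (b - a) * (|c - i| * PySem.List.pyGetD A i 0) ≤ (b - a) * Fv N A c :=
        mul_le_mul_of_nonneg_left hgc (by omega)
      have h3 : (c - a) * |b - i| * PySem.List.pyGetD A i 0 ≤
          ((c - b) * |a - i| + (b - a) * |c - i|) * PySem.List.pyGetD A i 0 :=
        mul_le_mul_of_nonneg_right tri hv
      rw [hF']
      nlinarith [h1, h2, h3]
    · apply hzero
      have habs : (0:Int) ≤ |b - i| := abs_nonneg _
      have : |b - i| * PySem.List.pyGetD A i 0 ≤ 0 := by nlinarith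
      omega

-- quasiconvexity consequences used by the ternary-search invariant
theorem Fv_left_ge (N : Int) (A : List Int) (x m1 m2 : Int) (hx : x ≤ m1) (h12 : m1 < m2)
    (hlt : Fv N A m2 < Fv N A m1) : Fv N A m1 ≤ Fv N A x := by
  by_contra hcon
  rw [not_le] at hcon
  have hc := Fv_convex N A x m1 m2 hx (le_of_lt h12)
  have p1 : 0 < (m2 - m1) * (Fv N A m1 - Fv N A x) := mul_pos (by omega) (by omega)
  have p2 : 0 ≤ (m1 - x) * (Fv N A m1 - Fv N A m2) := mul_nonneg (by omega) (by omega)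
  nlinarith [hc, p1, p2]

theorem Fv_right_ge (N : Int) (A : List Int) (m1 m2 x : Int) (h12 : m1 < m2) (hx : m2 ≤ x)
    (hle : Fv N A m1 ≤ Fv N A m2) : Fv N A m2 ≤ Fv N A x := by
  by_contra hcon
  rw [not_le] at hcon
  have hc := Fv_convex N A m1 m2 x (le_of_lt h12) hx
  have p1 : 0 ≤ (x - m2) * (Fv N A m2 - Fv N A m1) := mul_nonneg (by omega) (by omega)
  have p2 : 0 < (m2 - m1) * (Fv N A m2 - Fv N A x) := mul_pos (by omega) (by omega)
  nlinarith [hc, p1, p2]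

theorem checkA_eq_Fv (N : Int) (A : List Int) (x : Int) (hx0 : 0 ≤ x) (hxN : x < N) :
    checkA N A x = Fv N A x := by
  have e1 : checkA N A x = loMax (fun i => (i - x) * PySem.List.pyGetD A i 0) (x + 1) N
      (loMax (fun i => (x - i) * PySem.List.pyGetD A i 0) 0 x 0) := rfl
  have e2 : Fv N A x = loMax (fun i => |x - i| * PySem.List.pyGetD A i 0) (x + 1) N
      (loMax (fun i => |x - i| * PySem.List.pyGetD A i 0) x (x + 1)
        (loMax (fun i => |x - i| * PySem.List.pyGetD A i 0) 0 x 0)) := by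
    rw [Fv, loMax_split _ 0 x N 0 hx0 (by omega), loMax_split _ x (x + 1) N _ (by omega) (by omega)]
  have e3 : loMax (fun i => |x - i| * PySem.List.pyGetD A i 0) x (x + 1)
      (loMax (fun i => |x - i| * PySem.List.pyGetD A i 0) 0 x 0)
      = loMax (fun i => |x - i| * PySem.List.pyGetD A i 0) 0 x 0 := by
    rw [loMax_cons _ x (x + 1) _ (by omega), loMax_nil _ (x + 1) (x + 1) _ le_rfl]
    simp only [sub_self, abs_zero, zero_mul]
    exact max_eq_left (acc_le_loMax _ 0 x 0)
  rw [e1, e2, e3,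
    loMax_congr (fun i => |x - i| * PySem.List.pyGetD A i 0)
      (fun i => (x - i) * PySem.List.pyGetD A i 0) 0 x 0
      (fun i h1 h2 => by simp only; rw [abs_of_nonneg (by omega : (0:Int) ≤ x - i)]),
    loMax_congr (fun i => |x - i| * PySem.List.pyGetD A i 0)
      (fun i => (i - x) * PySem.List.pyGetD A i 0) (x + 1) N _
      (fun i h1 h2 => by simp only; rw [abs_of_nonpos (by omega : x - i ≤ 0)]; ring)]

theorem innerB_eq_Fv (N : Int) (A : List Int) (x : Int) (h2 : N ≤ (A.length : Int)) (h0 : 0 ≤ N) :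
    innerB N A x = Fv N A x := by
  have hn : (N.toNat : Int) = N := Int.toNat_of_nonneg h0
  have hnlen : N.toNat ≤ A.length := by omega
  have hsl : PySem.List.slice A none (some N) = A.take N.toNat := PySem.List.slice_to A h0
  have hlen : (A.take N.toNat).length = N.toNat := by
    rw [List.length_take]; omega
  rw [innerB, hsl, PySem.List.enumerate_eq_map_pyRange (A.take N.toNat) 0, List.foldl_map,
    PySem.List.len_eq, hlen, hn]
  rw [PySem.List.foldl_congr_mem' _
    (fun cur j => if |x - (j, PySem.List.pyGetD (A.take N.toNat) j 0).1| *
        (j, PySem.List.pyGetD (A.take N.toNat) j 0).2 > cur then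
        |x - (j, PySem.List.pyGetD (A.take N.toNat) j 0).1| *
        (j, PySem.List.pyGetD (A.take N.toNat) j 0).2 else cur)
    (fun cur j => max cur (|x - j| * PySem.List.pyGetD (A.take N.toNat) j 0)) 0
    (fun j hj cur => by
      simp only [max_def]
      split_ifs <;> omega)]
  show loMax (fun j => |x - j| * PySem.List.pyGetD (A.take N.toNat) j 0) 0 N 0 = Fv N A x
  rw [Fv]
  apply loMax_congr
  intro j h1 h2
  have hj : j.toNat < N.toNat := by omega
  rw [PySem.List.pyGetD_eq_getElem (A.take N.toNat) 0 h1 (by rw [hlen]; omega),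
    PySem.List.pyGetD_eq_getElem A 0 h1 (by omega), List.getElem_take]

-- the while loop keeps 0 ≤ s, e ≤ N-1, s ≤ e and preserves the min of Fv over [s, e]
theorem whileInv (N : Int) (A : List Int) (s e : Int) (hs : 0 ≤ s) (he : e ≤ N - 1) (hse : s ≤ e) :
    0 ≤ (solveWhile N A s e).1 ∧ (solveWhile N A s e).2 ≤ N - 1 ∧
    (solveWhile N A s e).1 ≤ (solveWhile N A s e).2 ∧
    loMin (Fv N A) (solveWhile N A s e).1 ((solveWhile N A s e).2 + 1) 1000000000000000
      = loMin (Fv N A) s (e + 1) 1000000000000000 := by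
  rw [solveWhile]
  by_cases hgt : 2 < e - s
  · rw [dif_pos hgt]
    obtain ⟨b1, b2, b3⟩ := pvMidBounds s e hgt
    set m1 : Int := PySem.Int.floordiv (s * 2 + e) 3 with hm1
    set m2 : Int := PySem.Int.floordiv (s + e * 2) 3 with hm2
    have hc1 : checkA N A m1 = Fv N A m1 := checkA_eq_Fv N A m1 (by omega) (by omega)
    have hc2 : checkA N A m2 = Fv N A m2 := checkA_eq_Fv N A m2 (by omega) (by omega)
    by_cases hcmp : checkA N A m1 > checkA N A m2
    · rw [if_pos hcmp]
      have hFlt : Fv N A m2 < Fv N A m1 := by rw [← hc1, ← hc2]; exact hcmp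
      obtain ⟨i1, i2, i3, i4⟩ := whileInv N A (m1 + 1) e (by omega) he (by omega)
      refine ⟨i1, i2, i3, ?_⟩
      rw [i4]
      apply le_antisymm
      · apply le_loMin
        · exact loMin_le_acc _ _ _ _
        · intro y hy1 hy2
          by_cases hym : y ≤ m1
          · have hge : Fv N A m1 ≤ Fv N A y := Fv_left_ge N A y m1 m2 hym b2 hFlt
            have ht : loMin (Fv N A) (m1 + 1) (e + 1) 1000000000000000 ≤ Fv N A m2 :=
              loMin_le _ _ _ _ m2 (by omega) (by omega)
            omega
          · exact loMin_le _ _ _ _ y (by omega) hy2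
      · apply le_loMin
        · exact loMin_le_acc _ _ _ _
        · intro y hy1 hy2
          exact loMin_le _ _ _ _ y (by omega) hy2
    · rw [if_neg hcmp]
      have hFle : Fv N A m1 ≤ Fv N A m2 := by rw [← hc1, ← hc2]; omega
      obtain ⟨i1, i2, i3, i4⟩ := whileInv N A s m2 hs (by omega) (by omega)
      refine ⟨i1, i2, i3, ?_⟩
      rw [i4]
      apply le_antisymm
      · apply le_loMin
        · exact loMin_le_acc _ _ _ _
        · intro y hy1 hy2
          by_cases hym : m2 < y
          · have hge : Fv N A m2 ≤ Fv N A y := Fv_right_ge N A m1 m2 y b2 (by omega) hFle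
            have ht : loMin (Fv N A) s (m2 + 1) 1000000000000000 ≤ Fv N A m2 :=
              loMin_le _ _ _ _ m2 (by omega) (by omega)
            omega
          · exact loMin_le _ _ _ _ y hy1 (by omega)
      · apply le_loMin
        · exact loMin_le_acc _ _ _ _
        · intro y hy1 hy2
          exact loMin_le _ _ _ _ y hy1 (by omega)
  · rw [dif_neg hgt]
    exact ⟨hs, he, hse, rfl⟩
termination_by (e - s).toNat
decreasing_by
  · have := pvMidBounds s e hgt; omega
  · have := pvMidBounds s e hgt; omega

-- ===== VERDICT (by name: the statement is the Claim_ definition above) =====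
theorem solve_spec : Claim_equal_solve := by
  intro N A _ hPre
  show solve N A = solve_alt N A
  have hsolve : solve N A = loMin (checkA N A) (solveWhile N A 0 (N - 1)).1
      ((solveWhile N A 0 (N - 1)).2 + 1) 1000000000000000 := rfl
  have halt : solve_alt N A = loMin (innerB N A) 0 N 1000000000000000 := rfl
  have hN1 : N - 1 + 1 = N := by ring
  rw [hsolve, halt]
  by_cases hN2 : 2 ≤ N
  · have hlen : N ≤ (A.length : Int) := by
      rcases hPre with h | h
      · omega
      · exact h
    obtain ⟨i1, i2, i3, i4⟩ := whileInv N A 0 (N - 1) le_rfl le_rfl (by omega)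
    rw [loMin_congr (checkA N A) (Fv N A) _ _ _
        (fun y h1 h2 => checkA_eq_Fv N A y (by omega) (by omega)),
      i4, hN1,
      loMin_congr (innerB N A) (Fv N A) 0 N _
        (fun y h1 h2 => innerB_eq_Fv N A y hlen (by omega))]
  · have hw : solveWhile N A 0 (N - 1) = (0, N - 1) := by
      rw [solveWhile, dif_neg (by omega : ¬ 2 < N - 1 - 0)]
    rw [hw]
    by_cases hN0 : N ≤ 0
    · rw [loMin_nil _ _ _ _ (by omega), loMin_nil _ _ _ _ (by omega)]
    · have h1 : N = 1 := by omega
      subst h1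
      rw [show (1:Int) - 1 + 1 = 1 from by ring]
      apply loMin_congr
      intro y hy1 hy2
      have hy : y = 0 := by omega
      subst hy
      cases A with
      | nil => decide
      | cons a t =>
        show checkA 1 (a :: t) 0 = innerB 1 (a :: t) 0
        have hc : checkA 1 (a :: t) 0 = 0 := rfl
        have hb : innerB 1 (a :: t) 0 = 0 := by
          show (PySem.List.enumerate (PySem.List.slice (a :: t) none (some 1)) 0).foldl
            (fun cur p => if |(0:Int) - p.1| * p.2 > cur then |(0:Int) - p.1| * p.2 else cur) 0 = 0
          rw [show PySem.List.slice (a :: t) none (some 1) = [a] from by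
            rw [PySem.List.slice_to _ (by omega)]; rfl]
          show (if |(0:Int) - 0| * a > 0 then |(0:Int) - 0| * a else 0) = 0
          rw [if_neg (by simp)]
        rw [hc, hb]
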